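-- pv_equiv track=rewrite | github.com/hyxie2023/M2-MFP | time_patch_ours/s3_get_time_patch_sample.py | get_group_count_and_max_consecutive_length
-- ===== SOURCE A (Python) =====
-- from typing import Tuple, List
--
-- def get_group_count_and_max_consecutive_length(nums, m) -> Tuple[int, int]:
--     if not nums:
--         return 0, 0
--     nums.sort()
--     group_count, max_consecutive_length = 1, 1
--     current_count = 1
--
--     for i in range(1, len(nums)):
--         if nums[i] - nums[i - 1] <= m:
--             current_count += 1
--         else:
--             max_consecutive_length = max(max_consecutive_length, current_count)
--             group_count += 1
--             current_count = 1
--     max_consecutive_length = max(max_consecutive_length, current_count)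
--
--     return group_count, max_consecutive_length
-- ===== SOURCE B (Python) =====
-- def get_group_count_and_max_consecutive_length(nums, m):
--     nums.sort()
--     n = len(nums)
--     if n == 0:
--         return 0, 0
--     # boundary-index decomposition: list the cut positions (where the sorted
--     # gap exceeds m), bracketed by 0 and n; the group count is the number of
--     # intervals between cuts and the max run length is the widest interval.
--     cuts = [0] + [i for i in range(1, n) if nums[i] - nums[i - 1] > m] + [n]
--     return len(cuts) - 1, max(b - a for a, b in zip(cuts, cuts[1:]))
-- ===== Notes on version B (the rewrite author's own statement) =====
-- stated objective: alternative
-- what changed: A fuses group count, current run length and running max into one stateful counter loop; B keeps no run state at all: it materialises the list of cut positions (indices whose sorted gap exceeds m) bracketed by 0 and n, then reads the group count off as len(cuts)-1 and the max run length as the largest difference between adjacent cut positions.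
import Mathlib
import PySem

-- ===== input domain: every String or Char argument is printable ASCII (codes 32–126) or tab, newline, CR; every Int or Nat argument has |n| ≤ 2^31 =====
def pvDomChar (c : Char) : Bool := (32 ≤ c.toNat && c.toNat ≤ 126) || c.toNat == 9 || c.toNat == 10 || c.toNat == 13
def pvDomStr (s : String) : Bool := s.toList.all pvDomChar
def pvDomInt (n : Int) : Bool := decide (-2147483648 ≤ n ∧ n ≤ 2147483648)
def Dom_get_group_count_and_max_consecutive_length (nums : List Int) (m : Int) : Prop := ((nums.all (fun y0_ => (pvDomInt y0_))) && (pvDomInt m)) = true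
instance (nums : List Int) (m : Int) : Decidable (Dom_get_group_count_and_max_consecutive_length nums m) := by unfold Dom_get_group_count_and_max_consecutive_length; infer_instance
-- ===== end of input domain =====

-- B replaces A's fused counter loop (group count / current run / running max) by a
-- boundary-index decomposition (same cost): the cut positions bracketed by 0 and n,
-- with both answers read off that cut list. Both Pythons sort `nums` in place; the
-- equivalence proved here is about the RETURN value.

-- ===== PORT A =====
-- loop body of A: state (group_count, max_consecutive_length, current_count), gap d
def stepA (m : Int) (st : Int × Int × Int) (d : Int) : Int × Int × Int :=
  if d ≤ m then (st.1, st.2.1, st.2.2 + 1)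
  else (st.1 + 1, max st.2.1 st.2.2, 1)

def get_group_count_and_max_consecutive_length (nums : List Int) (m : Int) : Int × Int :=
  if nums = [] then (0, 0)
  else
    let s := PySem.List.sorted nums (fun x => x) false
    let st := (PySem.List.pyRange 1 (s.length : Int) 1).foldl
      (fun st i => stepA m st (PySem.List.pyGetD s i 0 - PySem.List.pyGetD s (i - 1) 0))
      ((1 : Int), (1 : Int), (1 : Int))
    (st.1, max st.2.1 st.2.2)

-- ===== PORT B =====
def get_group_count_and_max_consecutive_length_alt (nums : List Int) (m : Int) : Int × Int :=
  let s := PySem.List.sorted nums (fun x => x) false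
  let n : Int := (s.length : Int)
  if n = 0 then (0, 0)
  else
    let cuts : List Int :=
      [0] ++ (PySem.List.pyRange 1 n 1).filter
               (fun i => PySem.List.pyGetD s i 0 - PySem.List.pyGetD s (i - 1) 0 > m)
             ++ [n]
    let spans := (List.zip cuts (PySem.List.slice cuts (some 1) none)).map (fun ab => ab.2 - ab.1)
    ((cuts.length : Int) - 1, (PySem.List.max? spans (fun y => y)).getD 0)

-- ===== PRECONDITION & SPEC =====
def Spec_get_group_count_and_max_consecutive_length (nums : List Int) (m : Int) (out : Int × Int) : Prop := out = get_group_count_and_max_consecutive_length_alt nums m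
instance (nums : List Int) (m : Int) (out : Int × Int) : Decidable (Spec_get_group_count_and_max_consecutive_length nums m out) := by unfold Spec_get_group_count_and_max_consecutive_length; infer_instance

-- ===== CLAIM (what is proved, stated in full; the proofs are below) =====
def Claim_equal_get_group_count_and_max_consecutive_length : Prop := ∀ (nums : List Int) (m : Int), Dom_get_group_count_and_max_consecutive_length nums m → Spec_get_group_count_and_max_consecutive_length nums m (get_group_count_and_max_consecutive_length nums m)

-- ===== LEMMAS AND PROOFS =====

-- the gaps of a list (also: the spans of a cut list)
def spansOf (l : List Int) : List Int := (List.zip l l.tail).map (fun ab => ab.2 - ab.1)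
-- last element, default 0
def lastD (l : List Int) : Int := l.getLast?.getD 0
-- 0-based positions of the gaps exceeding m
def bposN (m : Int) (d : List Int) : List Nat :=
  (List.range d.length).filter (fun k => decide (d.getD k 0 > m))
-- the corresponding 1-based cut positions, as integers
def cutsP (m : Int) (d : List Int) : List Int := (bposN m d).map (fun (k : Nat) => (k : Int) + 1)

lemma spansOf_cons_cons (a b : Int) (t : List Int) :
    spansOf (a :: b :: t) = (b - a) :: spansOf (b :: t) := rfl

lemma spansOf_map_add : ∀ (l : List Int), spansOf (l.map (fun x => x + 1)) = spansOf l := by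
  intro l
  induction l with
  | nil => rfl
  | cons a t ih =>
    cases t with
    | nil => rfl
    | cons b t' =>
      simp only [List.map_cons] at ih ⊢
      rw [spansOf_cons_cons, ih, spansOf_cons_cons]
      congr 1
      ring

lemma bposN_cons (m x : Int) (d : List Int) :
    bposN m (x :: d) = (if x > m then [0] else []) ++ (bposN m d).map Nat.succ := by
  simp only [bposN, List.length_cons, List.range_succ_eq_map, List.filter_cons, List.filter_map,
    Function.comp_def, List.getD_cons_zero, List.getD_cons_succ]
  by_cases hx : x > m
  · simp [hx]
  · simp [hx]

lemma cutsP_cons (m x : Int) (d : List Int) :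
    cutsP m (x :: d) = (if x > m then [1] else []) ++ (cutsP m d).map (fun y => y + 1) := by
  have hmap : ∀ P : List Nat, (P.map Nat.succ).map (fun (k : Nat) => (k : Int) + 1)
      = (P.map (fun (k : Nat) => (k : Int) + 1)).map (fun y => y + 1) := by
    intro P
    rw [List.map_map, List.map_map]
    exact List.map_congr_left fun k _ => by push_cast [Function.comp_def, Nat.succ_eq_add_one]; ring
  by_cases hx : x > m
  · rw [cutsP, bposN_cons, if_pos hx, if_pos hx, List.map_append, hmap, cutsP]
    congr 1
  · rw [cutsP, bposN_cons, if_neg hx, if_neg hx, List.nil_append, List.nil_append, hmap, cutsP]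

lemma lastD_map_add (l : List Int) (h : l ≠ []) :
    lastD (l.map (fun x => x + 1)) = lastD l + 1 := by
  simp only [lastD, List.getLast?_map]
  cases hl : l.getLast? with
  | none => exact absurd (List.getLast?_eq_none_iff.mp hl) h
  | some x => simp

lemma spansOf_append_singleton (l : List Int) (x : Int) (h : l ≠ []) :
    spansOf (l ++ [x]) = spansOf l ++ [x - lastD l] := by
  induction l with
  | nil => exact absurd rfl h
  | cons a t ih =>
    cases t with
    | nil => simp [spansOf, lastD]
    | cons b t' =>
      have := ih (by simp)
      simp only [List.cons_append] at this ⊢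
      rw [spansOf_cons_cons, this, spansOf_cons_cons]
      have hl : lastD (a :: b :: t') = lastD (b :: t') := by
        simp [lastD, List.getLast?_cons_cons]
      rw [hl]
      simp

-- the current-count component of A's state stays ≥ 1
lemma stepA_cc_ge_one (m : Int) : ∀ (d : List Int) (g M c : Int), 1 ≤ c →
    1 ≤ (d.foldl (stepA m) (g, M, c)).2.2 := by
  intro d
  induction d with
  | nil => intro g M c hc; exact hc
  | cons x t ih =>
    intro g M c hc
    by_cases hx : x ≤ m
    · simpa [stepA, hx] using ih g M (c + 1) (by omega)
    · simpa [stepA, hx] using ih (g + 1) (max M c) 1 (by omega)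

-- the invariant: A's fused state read off the cut-position list
lemma invA (m : Int) : ∀ (d : List Int) (g M c : Int),
    (d.foldl (stepA m) (g, M, c)).1 = g + ((bposN m d).length : Int) ∧
    (d.foldl (stepA m) (g, M, c)).2.1 = (spansOf ((1 - c) :: cutsP m d)).foldl max M ∧
    (d.foldl (stepA m) (g, M, c)).2.2 = ((d.length : Int) + 1) - lastD ((1 - c) :: cutsP m d) := by
  intro d
  induction d with
  | nil =>
    intro g M c
    exact ⟨by simp [bposN], by simp [cutsP, bposN, spansOf], by simp [cutsP, bposN, lastD]⟩
  | cons x t ih =>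
    intro g M c
    by_cases hx : x ≤ m
    · have key : ((1 - c) :: cutsP m (x :: t)) = (((1 - (c + 1)) :: cutsP m t).map (fun y => y + 1)) := by
        rw [cutsP_cons, if_neg (by omega)]
        simp only [List.nil_append, List.map_cons]
        congr 1
        ring
      have hstep : (x :: t).foldl (stepA m) (g, M, c) = t.foldl (stepA m) (g, M, c + 1) := by
        simp [stepA, hx]
      obtain ⟨h1, h2, h3⟩ := ih g M (c + 1)
      refine ⟨?_, ?_, ?_⟩
      · rw [hstep, h1, bposN_cons, if_neg (not_lt.mpr hx)]
        simp
      · rw [hstep, h2, key, spansOf_map_add]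
      · rw [hstep, h3, key, lastD_map_add _ (by simp)]
        simp only [List.length_cons]
        push_cast
        ring
    · have hx' : x > m := not_le.mp hx
      have key : ((1 - c) :: cutsP m (x :: t)) =
          (1 - c) :: (((1 - 1 : Int) :: cutsP m t).map (fun y => y + 1)) := by
        rw [cutsP_cons, if_pos hx']
        norm_num
      have hstep : (x :: t).foldl (stepA m) (g, M, c) = t.foldl (stepA m) (g + 1, max M c, 1) := by
        simp [stepA, hx]
      obtain ⟨h1, h2, h3⟩ := ih (g + 1) (max M c) 1
      refine ⟨?_, ?_, ?_⟩
      · rw [hstep, h1, bposN_cons, if_pos hx']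
        simp only [List.length_append, List.length_cons, List.length_nil, List.length_map]
        push_cast
        ring
      · rw [hstep, h2, key]
        have he : (((1 - 1 : Int) :: cutsP m t).map (fun y => y + 1))
            = (1 - 1 + 1) :: (cutsP m t).map (fun y => y + 1) := by simp
        rw [he, spansOf_cons_cons, ← he, spansOf_map_add, List.foldl_cons]
        norm_num
      · rw [hstep, h3, key]
        have hl : lastD ((1 - c) :: ((1 - 1 : Int) :: cutsP m t).map (fun y => y + 1)) =
            lastD (((1 - 1 : Int) :: cutsP m t).map (fun y => y + 1)) := by
          simp only [lastD, List.map_cons, List.getLast?_cons_cons]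
        rw [hl, lastD_map_add _ (by simp)]
        simp only [List.length_cons]
        push_cast
        ring

lemma foldl_max_comm (l : List Int) : ∀ (a b : Int), max (l.foldl max a) b = l.foldl max (max a b) := by
  induction l with
  | nil => intro a b; rfl
  | cons h t ih =>
    intro a b
    simp only [List.foldl_cons]
    rw [ih, max_right_comm]

lemma max_append_singleton (l : List Int) (x : Int) :
    (PySem.List.max? (l ++ [x]) (fun y => y)).getD 0 = l.foldl max x := by
  cases l with
  | nil => simp [PySem.List.max?_id_cons]
  | cons h t =>
    rw [List.cons_append, PySem.List.max?_id_cons, Option.getD_some, List.foldl_append,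
      List.foldl_cons, List.foldl_nil, foldl_max_comm, List.foldl_cons, max_comm x h]

-- the gaps as index differences (both ports read them through pyGetD on the sorted list)
lemma diffs_map : ∀ (s : List Int),
    (List.range (s.length - 1)).map (fun k => s.getD (k + 1) 0 - s.getD k 0)
    = spansOf s := by
  intro s
  induction s with
  | nil => simp [spansOf]
  | cons x t ih =>
    cases t with
    | nil => simp [spansOf]
    | cons y t' =>
      simp only [List.length_cons, Nat.add_sub_cancel, List.range_succ_eq_map,
        List.map_cons, List.map_map] at *
      rw [spansOf_cons_cons]
      have hh : (x :: y :: t').getD (0 + 1) 0 - (x :: y :: t').getD 0 0 = y - x := by simp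
      rw [hh]
      congr 1

-- A's range-indexed fold is the fold over the gap list
lemma foldA_range (m : Int) (s : List Int) (init : Int × Int × Int) :
    (PySem.List.pyRange 1 (s.length : Int) 1).foldl
      (fun st i => stepA m st (PySem.List.pyGetD s i 0 - PySem.List.pyGetD s (i - 1) 0)) init
    = (spansOf s).foldl (stepA m) init := by
  rw [PySem.List.pyRange_one, List.foldl_map, ← diffs_map, List.foldl_map]
  have hn : ((s.length : Int) - 1).toNat = s.length - 1 := by omega
  rw [hn]
  apply List.foldl_ext
  intro acc k _
  rw [show (1 : Int) + (k : Int) = ((k + 1 : Nat) : Int) by omega]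
  rw [show ((k + 1 : Nat) : Int) - 1 = ((k : Nat) : Int) by omega]
  rw [PySem.List.pyGetD_natCast, PySem.List.pyGetD_natCast]

lemma spansOf_length (s : List Int) : (spansOf s).length = s.length - 1 := by
  rw [← diffs_map]; simp

-- B's range-indexed filter is the cut-position list of the gap list
lemma filterB_range (m : Int) (s : List Int) :
    (PySem.List.pyRange 1 (s.length : Int) 1).filter
      (fun i => PySem.List.pyGetD s i 0 - PySem.List.pyGetD s (i - 1) 0 > m)
    = cutsP m (spansOf s) := by
  rw [PySem.List.pyRange_one, List.filter_map]
  have hn : ((s.length : Int) - 1).toNat = s.length - 1 := by omega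
  rw [hn]
  have hfc : List.filter ((fun i => decide (PySem.List.pyGetD s i 0 - PySem.List.pyGetD s (i - 1) 0 > m))
        ∘ (fun (k : Nat) => (1 : Int) + (k : Int))) (List.range (s.length - 1))
      = List.filter (fun (k : Nat) => decide ((spansOf s).getD k 0 > m)) (List.range (s.length - 1)) := by
    apply List.filter_congr
    intro k hk
    rw [List.mem_range] at hk
    simp only [Function.comp_def]
    rw [show (1 : Int) + (k : Int) = ((k + 1 : Nat) : Int) by omega]
    rw [show ((k + 1 : Nat) : Int) - 1 = ((k : Nat) : Int) by omega]
    rw [PySem.List.pyGetD_natCast, PySem.List.pyGetD_natCast]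
    have hsp : (spansOf s).getD k 0 = s.getD (k + 1) 0 - s.getD k 0 := by
      rw [← diffs_map, List.getD_eq_getElem?_getD, List.getElem?_map, List.getElem?_range hk]
      simp
    rw [hsp]
  rw [hfc, cutsP, bposN, spansOf_length]
  apply List.map_congr_left
  intro k _
  ring

-- ===== VERDICT (by name: the statement is the Claim_ definition above) =====
theorem get_group_count_and_max_consecutive_length_spec : Claim_equal_get_group_count_and_max_consecutive_length := by
  intro nums m _
  unfold Spec_get_group_count_and_max_consecutive_length
  unfold get_group_count_and_max_consecutive_length get_group_count_and_max_consecutive_length_alt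
  by_cases h : nums = []
  · subst h
    have hs : PySem.List.sorted ([] : List Int) (fun x => x) false = [] := by
      rw [PySem.List.sorted_eq_nil_iff]
    simp [hs]
  · have hs : PySem.List.sorted nums (fun x => x) false ≠ [] := by
      rw [Ne, PySem.List.sorted_eq_nil_iff]; exact h
    set s := PySem.List.sorted nums (fun x => x) false with hs_def
    have hsl : s.length ≠ 0 := fun hc => hs (List.length_eq_zero_iff.mp hc)
    have hn0 : ((s.length : Int)) ≠ 0 := by omega
    simp only [if_neg h, if_neg hn0, PySem.List.slice_from_one, filterB_range, foldA_range]
    set d := spansOf s with hd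
    set C : List Int := (0 : Int) :: cutsP m d with hC
    have hC' : ((0 : Int) :: cutsP m d) = (1 - 1 : Int) :: cutsP m d := by norm_num
    obtain ⟨h1, h2, h3⟩ := invA m d 1 1 1
    have hcc : 1 ≤ (d.foldl (stepA m) (1, 1, 1)).2.2 := stepA_cc_ge_one m d 1 1 1 le_rfl
    have hdlen : ((d.length : Int) + 1) = (s.length : Int) := by
      have h1' : d.length = s.length - 1 := by rw [hd, spansOf_length]
      omega
    have hcuts : ([ (0:Int) ] ++ cutsP m d ++ [(s.length : Int)]) = C ++ [(s.length : Int)] := by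
      simp [hC]
    rw [hcuts]
    have hCne : C ≠ [] := by simp [hC]
    have hspans : (List.zip (C ++ [(s.length : Int)]) (C ++ [(s.length : Int)]).tail).map
        (fun ab => ab.2 - ab.1) = spansOf C ++ [(s.length : Int) - lastD C] :=
      spansOf_append_singleton C _ hCne
    rw [hspans, max_append_singleton]
    have hlast : (s.length : Int) - lastD C = (d.foldl (stepA m) (1, 1, 1)).2.2 := by
      rw [h3, ← hC', ← hC, hdlen]
    have hx1 : 1 ≤ (s.length : Int) - lastD C := hlast ▸ hcc
    rw [Prod.mk.injEq]
    refine ⟨?_, ?_⟩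
    · rw [h1]
      simp only [hC, List.length_append, List.length_cons, List.length_nil, cutsP,
        List.length_map]
      push_cast
      ring
    · rw [h2, ← hC', ← hC, hlast.symm]
      rw [foldl_max_comm, max_comm, max_eq_left hx1]
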